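-- pv_equiv track=rewrite | github.com/MaximKovalevsky/4 | main.py | swapMinMax
-- ===== SOURCE A (Python) =====
-- def swapMinMax(list):
--     if len(list) < 2:
--         return list
--
--     min_index = 0
--     max_index = 0
--     for i in range(1, len(list)):
--         if list[i] < list[min_index]:
--             min_index = i
--         if list[i] > list[max_index]:
--             max_index = i
--
--     list[min_index], list[max_index] = list[max_index], list[min_index]
--     return list
-- ===== SOURCE B (Python) =====
-- def swapMinMax(list):
--     if len(list) < 2:
--         return list
--
--     mn = min(list)
--     mx = max(list)
--     min_index = list.index(mn)
--     max_index = list.index(mx)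
--
--     list[min_index], list[max_index] = list[max_index], list[min_index]
--     return list
-- ===== Notes on version B (the rewrite author's own statement) =====
-- stated objective: idiomatic
-- what changed: Replaces the single hand-written index-tracking loop with builtin min()/max() to get the extreme values and list.index() to locate their first occurrences, then the same swap.
import Mathlib
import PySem

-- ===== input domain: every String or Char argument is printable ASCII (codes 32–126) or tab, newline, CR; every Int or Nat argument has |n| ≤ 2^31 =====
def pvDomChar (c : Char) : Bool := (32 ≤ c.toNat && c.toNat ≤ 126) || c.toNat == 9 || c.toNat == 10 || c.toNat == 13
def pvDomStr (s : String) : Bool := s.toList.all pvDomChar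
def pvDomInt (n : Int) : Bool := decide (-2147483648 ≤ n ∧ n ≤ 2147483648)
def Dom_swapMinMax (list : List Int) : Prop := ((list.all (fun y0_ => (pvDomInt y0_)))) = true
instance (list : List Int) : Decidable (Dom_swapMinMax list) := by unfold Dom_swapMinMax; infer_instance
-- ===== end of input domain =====

-- B replaces A's single index-tracking loop by builtin min/max plus list.index (first
-- occurrence), keeping guard and swap: idiomatic, same O(n) cost, return value identical.
-- Both Pythons mutate the argument in place; the equivalence proved here is about the
-- RETURN value (both B and A perform the same mutation anyway).

-- ===== PORT A =====
-- the index-tracking loop of A (i runs over range(1, len(list)); state = (min_index, max_index))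
def pvLoopA (l : List Int) (n : Nat) : Int × Int :=
  (PySem.List.pyRange 1 (n : Int) 1).foldl
    (fun st i =>
      let mi := if PySem.List.pyGetD l i 0 < PySem.List.pyGetD l st.1 0 then i else st.1
      let ma := if PySem.List.pyGetD l i 0 > PySem.List.pyGetD l st.2 0 then i else st.2
      (mi, ma)) (0, 0)

def swapMinMax (list : List Int) : List Int :=
  if list.length < 2 then list
  else
    let st := pvLoopA list list.length
    PySem.List.pySetD
      (PySem.List.pySetD list st.1 (PySem.List.pyGetD list st.2 0))
      st.2 (PySem.List.pyGetD list st.1 0)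

-- ===== PORT B =====
def swapMinMax_alt (list : List Int) : List Int :=
  if list.length < 2 then list
  else
    match PySem.List.min? list (fun x => x), PySem.List.max? list (fun x => x) with
    | some mn, some mx =>
      match PySem.List.index? list mn, PySem.List.index? list mx with
      | some min_index, some max_index =>
          PySem.List.pySetD
            (PySem.List.pySetD list (min_index : Int)
              (PySem.List.pyGetD list (max_index : Int) 0))
            (max_index : Int) (PySem.List.pyGetD list (min_index : Int) 0)
      | _, _ => list   -- unreachable: mn, mx are members of list
    | _, _ => list     -- unreachable: list is nonempty here

-- ===== PRECONDITION & SPEC =====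
def Spec_swapMinMax (list : List Int) (out : List Int) : Prop := out = swapMinMax_alt list
instance (list : List Int) (out : List Int) : Decidable (Spec_swapMinMax list out) := by unfold Spec_swapMinMax; infer_instance

-- ===== CLAIM (what is proved, stated in full; the proofs are below) =====
def Claim_equal_swapMinMax : Prop := ∀ (list : List Int), Dom_swapMinMax list → Spec_swapMinMax list (swapMinMax list)

-- ===== LEMMAS AND PROOFS =====

-- invariant of A's loop: after scanning indices 1..n-1 the state is (mi, ma) where mi is the
-- first index of the minimum of the first n elements, ma the first index of the maximum
theorem pvLoopA_spec (l : List Int) (n : Nat) (h1 : 1 ≤ n) (hn : n ≤ l.length) :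
    ∃ mi ma : Nat, pvLoopA l n = ((mi : Int), (ma : Int)) ∧ mi < n ∧ ma < n ∧
      (∀ j, j < n → l.getD mi 0 ≤ l.getD j 0) ∧
      (∀ j, j < mi → l.getD mi 0 < l.getD j 0) ∧
      (∀ j, j < n → l.getD j 0 ≤ l.getD ma 0) ∧
      (∀ j, j < ma → l.getD j 0 < l.getD ma 0) := by
  induction n with
  | zero => omega
  | succ n ih =>
    by_cases hn1 : n = 0
    · subst hn1
      refine ⟨0, 0, ?_, by omega, by omega, ?_, by omega, ?_, by omega⟩
      · simp [pvLoopA, PySem.List.pyRange_one_eq_nil]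
      · intro j hj; interval_cases j; exact le_refl _
      · intro j hj; interval_cases j; exact le_refl _
    · obtain ⟨mi, ma, hst, hmi, hma, hminle, hminfst, hmaxle, hmaxfst⟩ :=
        ih (by omega) (by omega)
      have hrange : PySem.List.pyRange 1 ((n : Int) + 1) 1
          = PySem.List.pyRange 1 (n : Int) 1 ++ [(n : Int)] :=
        PySem.List.pyRange_one_succ_right (by exact_mod_cast Nat.one_le_iff_ne_zero.mpr hn1)
      have hfold : pvLoopA l (n + 1) =
          (let mi' := if PySem.List.pyGetD l (n : Int) 0 < PySem.List.pyGetD l ((mi : Int)) 0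
              then (n : Int) else (mi : Int)
           let ma' := if PySem.List.pyGetD l (n : Int) 0 > PySem.List.pyGetD l ((ma : Int)) 0
              then (n : Int) else (ma : Int)
           (mi', ma')) := by
        unfold pvLoopA
        rw [show ((n + 1 : Nat) : Int) = (n : Int) + 1 by push_cast; ring, hrange,
          List.foldl_append]
        rw [show (PySem.List.pyRange 1 (n : Int) 1).foldl _ (0, 0) = pvLoopA l n from rfl, hst]
        rfl
      simp only [PySem.List.pyGetD_natCast] at hfold
      by_cases hlt : l.getD n 0 < l.getD mi 0 <;> by_cases hgt : l.getD n 0 > l.getD ma 0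
      · refine ⟨n, n, ?_, by omega, by omega, ?_, ?_, ?_, ?_⟩
        · rw [hfold, if_pos hlt, if_pos hgt]
        · intro j hj; rcases Nat.lt_succ_iff_lt_or_eq.mp hj with h | h
          · exact le_trans (le_of_lt hlt) (hminle j h)
          · subst h; exact le_refl _
        · intro j hj; exact lt_of_lt_of_le hlt (hminle j hj)
        · intro j hj; rcases Nat.lt_succ_iff_lt_or_eq.mp hj with h | h
          · exact le_trans (hmaxle j h) (le_of_lt hgt)
          · subst h; exact le_refl _
        · intro j hj; exact lt_of_le_of_lt (hmaxle j hj) hgt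
      · refine ⟨n, ma, ?_, by omega, by omega, ?_, ?_, ?_, hmaxfst⟩
        · rw [hfold, if_pos hlt, if_neg hgt]
        · intro j hj; rcases Nat.lt_succ_iff_lt_or_eq.mp hj with h | h
          · exact le_trans (le_of_lt hlt) (hminle j h)
          · subst h; exact le_refl _
        · intro j hj; exact lt_of_lt_of_le hlt (hminle j hj)
        · intro j hj; rcases Nat.lt_succ_iff_lt_or_eq.mp hj with h | h
          · exact hmaxle j h
          · subst h; omega
      · refine ⟨mi, n, ?_, by omega, by omega, ?_, hminfst, ?_, ?_⟩
        · rw [hfold, if_neg hlt, if_pos hgt]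
        · intro j hj; rcases Nat.lt_succ_iff_lt_or_eq.mp hj with h | h
          · exact hminle j h
          · subst h; omega
        · intro j hj; rcases Nat.lt_succ_iff_lt_or_eq.mp hj with h | h
          · exact le_trans (hmaxle j h) (le_of_lt hgt)
          · subst h; exact le_refl _
        · intro j hj; exact lt_of_le_of_lt (hmaxle j hj) hgt
      · refine ⟨mi, ma, ?_, by omega, by omega, ?_, hminfst, ?_, hmaxfst⟩
        · rw [hfold, if_neg hlt, if_neg hgt]
        · intro j hj; rcases Nat.lt_succ_iff_lt_or_eq.mp hj with h | h
          · exact hminle j h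
          · subst h; omega
        · intro j hj; rcases Nat.lt_succ_iff_lt_or_eq.mp hj with h | h
          · exact hmaxle j h
          · subst h; omega

-- first index of a value v in l characterized via index?
theorem pv_index_unique (l : List Int) (v : Int) (k : Nat)
    (hk : k < l.length) (hv : l.getD k 0 = v) (hfst : ∀ j, j < k → l.getD j 0 ≠ v) :
    PySem.List.index? l v = some k := by
  have hmem : v ∈ l := by
    rw [← hv, List.getD_eq_getElem l 0 hk]; exact List.getElem_mem hk
  obtain ⟨k', hk'⟩ := Option.isSome_iff_exists.mp ((PySem.List.index?_isSome_iff l v).mpr hmem)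
  obtain ⟨hk'len, hget, hne⟩ := PySem.List.getElem_of_index?_eq_some hk'
  rcases Nat.lt_trichotomy k k' with h | h | h
  · exact absurd (show l[k] = v by rw [← List.getD_eq_getElem l 0 hk]; exact hv) (hne k h)
  · rw [hk', h]
  · exact absurd (show l.getD k' 0 = v by rw [List.getD_eq_getElem l 0 hk'len]; exact hget)
      (hfst k' h)

-- ===== VERDICT (by name: the statement is the Claim_ definition above) =====
theorem swapMinMax_spec : Claim_equal_swapMinMax := by
  unfold Claim_equal_swapMinMax Spec_swapMinMax
  intro l _
  unfold swapMinMax swapMinMax_alt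
  by_cases hlen : l.length < 2
  · simp [hlen]
  · simp only [hlen, if_false]
    obtain ⟨mi, ma, hst, hmi, hma, hminle, hminfst, hmaxle, hmaxfst⟩ :=
      pvLoopA_spec l l.length (by omega) le_rfl
    -- values of min? and max?
    have hne : l ≠ [] := by intro h; rw [h] at hlen; simp at hlen
    have hmnS : (PySem.List.min? l (fun x => x)).isSome = true := by
      rw [Option.isSome_iff_ne_none]; intro h
      exact hne ((PySem.List.min?_eq_none_iff l (fun x => x)).mp h)
    have hmxS : (PySem.List.max? l (fun x => x)).isSome = true := by
      rw [Option.isSome_iff_ne_none]; intro h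
      exact hne ((PySem.List.max?_eq_none_iff l (fun x => x)).mp h)
    obtain ⟨mn, hmn⟩ := Option.isSome_iff_exists.mp hmnS
    obtain ⟨mx, hmx⟩ := Option.isSome_iff_exists.mp hmxS
    have hmival : l.getD mi 0 = mn := by
      have h1 : mn ≤ l.getD mi 0 := by
        have := PySem.List.min?_isMin hmn (l.getD mi 0)
          (by rw [List.getD_eq_getElem l 0 hmi]; exact List.getElem_mem hmi)
        simpa using this
      have h2 : l.getD mi 0 ≤ mn := by
        obtain ⟨j, hj, hjv⟩ := List.mem_iff_getElem.mp (PySem.List.min?_mem hmn)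
        rw [← hjv, ← List.getD_eq_getElem l 0 hj]; exact hminle j hj
      omega
    have hmaval : l.getD ma 0 = mx := by
      have h1 : l.getD ma 0 ≤ mx := by
        have := PySem.List.max?_isMax hmx (l.getD ma 0)
          (by rw [List.getD_eq_getElem l 0 hma]; exact List.getElem_mem hma)
        simpa using this
      have h2 : mx ≤ l.getD ma 0 := by
        obtain ⟨j, hj, hjv⟩ := List.mem_iff_getElem.mp (PySem.List.max?_mem hmx)
        rw [← hjv, ← List.getD_eq_getElem l 0 hj]; exact hmaxle j hj
      omega
    have hidxmin : PySem.List.index? l mn = some mi :=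
      pv_index_unique l mn mi hmi hmival
        (fun j hj => by have := hminfst j hj; omega)
    have hidxmax : PySem.List.index? l mx = some ma :=
      pv_index_unique l mx ma hma hmaval
        (fun j hj => by have := hmaxfst j hj; omega)
    rw [hst]; simp only [hmn, hmx, hidxmin, hidxmax]
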